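-- pv_equiv track=rewrite | github.com/Bradsol/fa24_stars | kmerCheck.py | kmer_count
-- ===== SOURCE A (Python) =====
-- def kmer_count(kmers, text, k):
--   kmer_counts = {} #create dictionary
--
--   for kmer in kmers: #iterates through kmer list, initializing every count to 0
--     kmer_counts[kmer] = 0
--
--   for i in range(len(text) - k + 1): # goes through every possible substring of length of kmer
--     subsequence = text[i:i+k]
--     if subsequence in kmer_counts: # if that substring is equal to a kmer in the list, increment the kmer count
--       kmer_counts[subsequence] += 1
--
--   return kmer_counts
-- ===== SOURCE B (Python) =====
-- def kmer_count(kmers, text, k):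
--     # Per-query counting: for each requested kmer, scan the window positions and
--     # count matches; no shared table is built during the text scan.
--     n = len(text)
--     def occurrences(kmer):
--         return sum(1 for i in range(n - k + 1) if text[i:i+k] == kmer)
--     return {kmer: occurrences(kmer) for kmer in kmers}
-- ===== Notes on version B (the rewrite author's own statement) =====
-- stated objective: simpler
-- what changed: B swaps the loop nesting: instead of one scan over text updating a pre-initialised dict, it counts each requested kmer independently by a per-kmer scan of the window positions and assembles the result with a dict comprehension.
import Mathlib
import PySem

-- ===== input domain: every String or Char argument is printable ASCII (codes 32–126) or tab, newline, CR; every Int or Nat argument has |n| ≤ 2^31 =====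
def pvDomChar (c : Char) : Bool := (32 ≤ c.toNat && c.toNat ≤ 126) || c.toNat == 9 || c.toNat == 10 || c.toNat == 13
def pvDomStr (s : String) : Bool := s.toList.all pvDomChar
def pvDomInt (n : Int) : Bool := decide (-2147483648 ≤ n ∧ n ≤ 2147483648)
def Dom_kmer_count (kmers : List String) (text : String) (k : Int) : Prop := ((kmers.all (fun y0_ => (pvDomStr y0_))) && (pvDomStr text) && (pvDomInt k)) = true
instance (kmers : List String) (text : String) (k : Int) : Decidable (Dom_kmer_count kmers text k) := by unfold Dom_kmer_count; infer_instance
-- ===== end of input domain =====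

-- B swaps the loop nesting: it counts each requested kmer by its own scan of the window
-- positions (no shared table during the text scan); same results, plainer per-query shape.

-- ===== PORT A =====
def kmer_count (kmers : List String) (text : String) (k : Int) : List (String × Int) :=
  -- kmer_counts = {}; for kmer in kmers: kmer_counts[kmer] = 0
  let d0 : PySem.Dict String Int := kmers.foldl (fun d kmer => d.insert kmer 0) PySem.Dict.empty
  -- for i in range(len(text) - k + 1): subsequence = text[i:i+k]; if in dict: += 1
  let d1 := (PySem.List.pyRange 0 (PySem.Str.len text - k + 1) 1).foldl
    (fun d i =>
      let subsequence := PySem.Str.slice text (some i) (some (i + k))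
      if d.contains subsequence then d.modify subsequence 0 (· + 1) else d) d0
  d1.items

-- ===== PORT B =====
def kmer_count_alt (kmers : List String) (text : String) (k : Int) : List (String × Int) :=
  -- n = len(text)
  let n := PySem.Str.len text
  -- def occurrences(kmer): return sum(1 for i in range(n - k + 1) if text[i:i+k] == kmer)
  let occurrences := fun (kmer : String) =>
    (PySem.List.pyRange 0 (n - k + 1) 1).foldl
      (fun acc i => if PySem.Str.slice text (some i) (some (i + k)) == kmer then acc + 1 else acc)
      (0 : Int)
  -- return {kmer: occurrences(kmer) for kmer in kmers}
  (kmers.foldl (fun d kmer => d.insert kmer (occurrences kmer)) PySem.Dict.empty).items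

-- ===== PRECONDITION & SPEC =====
def Spec_kmer_count (kmers : List String) (text : String) (k : Int) (out : List (String × Int)) : Prop := out = kmer_count_alt kmers text k
instance (kmers : List String) (text : String) (k : Int) (out : List (String × Int)) : Decidable (Spec_kmer_count kmers text k out) := by unfold Spec_kmer_count; infer_instance

-- ===== CLAIM (what is proved, stated in full; the proofs are below) =====
def Claim_equal_kmer_count : Prop := ∀ (kmers : List String) (text : String) (k : Int), Dom_kmer_count kmers text k → Spec_kmer_count kmers text k (kmer_count kmers text k)

-- ===== LEMMAS AND PROOFS =====

-- getD at a key that an entry of a nodup-keyed dict carries returns that entry's value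
lemma getD_eq_of_mem_nodup (l : List (String × Int)) (p : String × Int)
    (hn : (l.map Prod.fst).Nodup) (hp : p ∈ l) :
    (PySem.Dict.mk l).getD p.1 0 = p.2 := by
  induction l with
  | nil => cases hp
  | cons q t ih =>
    simp only [List.map_cons, List.nodup_cons] at hn
    rcases List.mem_cons.1 hp with h | h
    · subst h
      simp [PySem.Dict.getD, PySem.Dict.get?, List.find?]
    · have hq : ¬ (q.1 == p.1) = true := by
        intro hb
        exact hn.1 (by simpa [eq_of_beq hb] using List.mem_map_of_mem (f := Prod.fst) h)
      have := ih hn.2 h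
      simpa [PySem.Dict.getD, PySem.Dict.get?, List.find?, hq] using this

-- one step of A's scan loop, at the items level
lemma step_items (d : PySem.Dict String Int) (w : String)
    (hn : (d.items.map Prod.fst).Nodup) :
    (if d.contains w then d.modify w 0 (· + 1) else d).items
      = d.items.map (fun p => if p.1 = w then (p.1, p.2 + 1) else p) := by
  by_cases hc : d.contains w = true
  · simp only [hc, if_true, PySem.Dict.modify, PySem.Dict.insert]
    apply List.map_congr_left
    intro p hp
    by_cases hw : p.1 = w
    · have hval : d.getD w 0 = p.2 := by
        have := getD_eq_of_mem_nodup d.items p hn hp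
        rwa [hw] at this
      simp [hw, hval]
    · simp [hw, beq_eq_false_iff_ne.2 hw]
  · rw [if_neg hc]
    have hnone : ∀ p ∈ d.items, ¬ p.1 = w := by
      intro p hp hpw
      apply hc
      unfold PySem.Dict.contains
      rw [List.any_eq_true]
      exact ⟨p, hp, by simp [hpw]⟩
    conv_lhs => rw [show d.items = d.items.map id from (List.map_id _).symm]
    apply List.map_congr_left
    intro p hp
    simp [hnone p hp]

-- A's scan over the window list bumps each entry by the window count of its key
lemma fold_bump (ws : List String) : ∀ (d : PySem.Dict String Int),
    (d.items.map Prod.fst).Nodup →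
    (ws.foldl (fun d w => if d.contains w then d.modify w 0 (· + 1) else d) d).items
      = d.items.map (fun p => (p.1, p.2 + (ws.count p.1 : Int))) := by
  induction ws with
  | nil =>
    intro d _
    simp
  | cons w t ih =>
    intro d hn
    have hstep := step_items d w hn
    have hkeys : ((if d.contains w then d.modify w 0 (· + 1) else d).items.map Prod.fst)
        = d.items.map Prod.fst := by
      rw [hstep, List.map_map]
      apply List.map_congr_left
      intro p _
      by_cases hw : p.1 = w <;> simp [hw]
    rw [List.foldl_cons, ih _ (by rw [hkeys]; exact hn), hstep, List.map_map]
    apply List.map_congr_left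
    intro p _
    by_cases hw : p.1 = w
    · simp [hw, Function.comp]
      ring
    · have hw' : ¬ w = p.1 := fun h => hw h.symm
      simp [hw, hw', Function.comp]

-- B's per-kmer fold from an already-bumped table equals A's zero fold followed by the bump map
lemma fold_rel (ws : List String) : ∀ (kmers : List String) (l : List (String × Int)),
    (kmers.foldl (fun d x => d.insert x ((ws.count x : Int)))
        (PySem.Dict.mk (l.map (fun p => (p.1, p.2 + (ws.count p.1 : Int)))))).items
      = (kmers.foldl (fun d x => d.insert x (0 : Int)) (PySem.Dict.mk l)).items.map
          (fun p => (p.1, p.2 + (ws.count p.1 : Int))) := by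
  intro kmers
  induction kmers with
  | nil => intro l; rfl
  | cons x t ih =>
    intro l
    have hcont : (PySem.Dict.mk (l.map (fun p => (p.1, p.2 + (ws.count p.1 : Int))))).contains x
        = (PySem.Dict.mk l).contains x := by
      simp [PySem.Dict.contains, List.any_map, Function.comp_def]
    have hins : ((PySem.Dict.mk (l.map (fun p => (p.1, p.2 + (ws.count p.1 : Int))))).insert x ((ws.count x : Int)))
        = PySem.Dict.mk ((((PySem.Dict.mk l).insert x (0 : Int)).items).map (fun p => (p.1, p.2 + (ws.count p.1 : Int)))) := by
      by_cases hc : (PySem.Dict.mk l).contains x = true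
      · simp only [PySem.Dict.insert, hcont, hc, if_true]
        congr 1
        simp only [List.map_map]
        apply List.map_congr_left
        intro p _
        by_cases hw : p.1 = x
        · simp [hw, Function.comp]
        · simp [beq_eq_false_iff_ne.2 hw, Function.comp]
      · simp only [PySem.Dict.insert, hcont, hc]
        simp
    rw [List.foldl_cons, List.foldl_cons, hins, ih]

-- keys produced by the zero-initialisation fold are distinct
lemma d0_keys_nodup (kmers : List String) :
    (((kmers.foldl (fun d kmer => d.insert kmer (0 : Int)) PySem.Dict.empty)).items.map Prod.fst).Nodup := by
  have h := PySem.Dict.keys_foldl_insert (ν := Int) kmers (fun _ _ => (0 : Int)) PySem.Dict.empty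
  have hk : ((kmers.foldl (fun d kmer => d.insert kmer (0 : Int)) PySem.Dict.empty)).items.map Prod.fst
      = PySem.Set.update ([] : PySem.Set String) kmers := by
    simpa [PySem.Dict.keys, PySem.Dict.empty] using h
  rw [hk]
  exact PySem.Set.nodup_update _ _ (by simp)

-- B's per-kmer scan of the window positions is the window list's count of that kmer
lemma occ_eq_count (text : String) (k : Int) (kmer : String) :
    (PySem.List.pyRange 0 (PySem.Str.len text - k + 1) 1).foldl
      (fun acc i => if PySem.Str.slice text (some i) (some (i + k)) == kmer then acc + 1 else acc)
      (0 : Int)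
    = (((PySem.List.pyRange 0 (PySem.Str.len text - k + 1) 1).map
        (fun i => PySem.Str.slice text (some i) (some (i + k)))).count kmer : Int) := by
  rw [← List.foldl_map (f := fun i => PySem.Str.slice text (some i) (some (i + k)))
        (g := fun (acc : Int) w => if w == kmer then acc + 1 else acc)]
  rw [PySem.List.foldl_beq_add_one]
  ring

-- ===== VERDICT (by name: the statement is the Claim_ definition above) =====
theorem kmer_count_spec : Claim_equal_kmer_count := by
  intro kmers text k _
  simp only [Spec_kmer_count, kmer_count, kmer_count_alt]
  have hA := List.foldl_map (f := fun i => PySem.Str.slice text (some i) (some (i + k)))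
    (g := fun (d : PySem.Dict String Int) w => if d.contains w then d.modify w 0 (· + 1) else d)
    (l := PySem.List.pyRange 0 (PySem.Str.len text - k + 1) 1)
    (init := kmers.foldl (fun d kmer => d.insert kmer 0) PySem.Dict.empty)
  beta_reduce at hA
  rw [← hA]
  set ws := (PySem.List.pyRange 0 (PySem.Str.len text - k + 1) 1).map
      (fun i => PySem.Str.slice text (some i) (some (i + k))) with hws
  have hocc : (fun (d : PySem.Dict String Int) kmer => d.insert kmer
        ((PySem.List.pyRange 0 (PySem.Str.len text - k + 1) 1).foldl
          (fun acc i => if PySem.Str.slice text (some i) (some (i + k)) == kmer then acc + 1 else acc)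
          (0 : Int)))
      = (fun (d : PySem.Dict String Int) x => d.insert x ((ws.count x : Int))) := by
    funext d x
    rw [occ_eq_count text k x, hws]
  rw [hocc]
  have h2 := fold_rel ws kmers []
  simp only [List.map_nil] at h2
  rw [show (PySem.Dict.empty : PySem.Dict String Int) = PySem.Dict.mk [] from rfl]
  rw [h2, fold_bump ws _ (by simpa using d0_keys_nodup kmers)]
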